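-- pv_equiv track=rewrite | github.com/7pairs/pyslash | pyslash/baseball.py | _format_score
-- ===== SOURCE A (Python) =====
-- def _format_score(scores):
--     """
--     スコア行(先攻のみ、もしくは後攻のみ)を構築する。
--
--     :param scores: 各イニングのスコア
--     :type scores: list
--     :return: スコア行
--     :rtype: str
--     """
--     # 各イニングのスコアを連結する
--     line = ''
--     for i, score in enumerate(scores):
--         if i != 0:
--             # 3イニングごとに広めに区切る
--             if i % 3 == 0:
--                 line += '  '
--             else:
--                 line += ' '
--         line += score
--
--     # 構築したスコア行を返す
--     return line
-- ===== SOURCE B (Python) =====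
-- def _format_score(scores):
--     """Group the inning scores in threes: join each group of three with a
--     single space, then join the group strings with a double space."""
--     parts = []
--     i = 0
--     while i < len(scores):
--         parts.append(' '.join(scores[i:i+3]))
--         i += 3
--     return '  '.join(parts)
-- ===== Notes on version B (the rewrite author's own statement) =====
-- stated objective: idiomatic
-- what changed: Replaces the index-and-conditional-separator accumulation over enumerate with a group-first two-level join: step through the list three at a time, join each chunk of three internally with ' ', and join the chunk strings with a double space at the end.
import Mathlib
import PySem

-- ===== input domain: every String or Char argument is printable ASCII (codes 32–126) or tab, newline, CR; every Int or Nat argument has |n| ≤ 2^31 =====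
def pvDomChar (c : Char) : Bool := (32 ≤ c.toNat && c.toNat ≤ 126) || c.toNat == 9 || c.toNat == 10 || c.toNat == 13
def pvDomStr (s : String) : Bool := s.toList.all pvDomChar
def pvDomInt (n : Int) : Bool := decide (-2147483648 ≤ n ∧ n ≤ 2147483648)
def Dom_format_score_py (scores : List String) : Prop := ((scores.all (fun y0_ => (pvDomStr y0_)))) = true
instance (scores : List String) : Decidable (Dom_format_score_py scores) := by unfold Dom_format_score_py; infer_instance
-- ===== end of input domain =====

-- B groups the scores in threes (join each chunk with ' ', chunks with '  ', recursing on the rest)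
-- instead of A's per-element accumulation with a conditional separator; objective: idiomatic.


-- ===== PORT A =====
-- the body of A's for-loop over enumerate(scores)
def pvStepA (line : String) (p : Int × String) : String :=
  (if p.1 ≠ 0 then (if PySem.Int.mod p.1 3 = 0 then line ++ "  " else line ++ " ") else line) ++ p.2

def format_score_py (scores : List String) : String :=
  (PySem.List.enumerate scores).foldl pvStepA ""

-- ===== PORT B =====
-- B's while loop: parts accumulates the chunk strings, i steps by 3
def pvBGroups (scores : List String) (i : Int) (parts : List String) : List String :=
  if _h : i < PySem.List.len scores then
    pvBGroups scores (i + 3) (parts ++ [PySem.Str.join " " (PySem.List.slice scores (some i) (some (i + 3)))])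
  else parts
termination_by (PySem.List.len scores - i).toNat
decreasing_by simp only [PySem.List.len_eq] at *; omega

def format_score_py_alt (scores : List String) : String :=
  PySem.Str.join "  " (pvBGroups scores 0 [])

-- ===== PRECONDITION & SPEC =====
def Spec_format_score_py (scores : List String) (out : String) : Prop := out = format_score_py_alt scores
instance (scores : List String) (out : String) : Decidable (Spec_format_score_py scores out) := by unfold Spec_format_score_py; infer_instance

-- ===== CLAIM (what is proved, stated in full; the proofs are below) =====
def Claim_equal_format_score_py : Prop := ∀ (scores : List String), Dom_format_score_py scores → Spec_format_score_py scores (format_score_py scores)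

-- ===== LEMMAS AND PROOFS =====

lemma pvStepA_zero (line s : String) : pvStepA line (0, s) = line ++ s := by
  simp [pvStepA]

lemma pvStepA_sep2 (line s : String) (k : Int) (hk : k ≠ 0) (h3 : k % 3 = 0) :
    pvStepA line (k, s) = (line ++ "  ") ++ s := by
  have hm : PySem.Int.mod k 3 = k % 3 := PySem.Int.mod_eq_emod_of_pos (by omega)
  simp [pvStepA, hk, h3]

lemma pvStepA_sep1 (line s : String) (k : Int) (hk : k ≠ 0) (h3 : k % 3 ≠ 0) :
    pvStepA line (k, s) = (line ++ " ") ++ s := by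
  have hm : PySem.Int.mod k 3 = k % 3 := PySem.Int.mod_eq_emod_of_pos (by omega)
  simp [pvStepA, hk, h3]

-- proof-side chunk list: the list of chunk strings B's loop builds
def pvChunks : List String → List String
  | [] => []
  | x :: rest => PySem.Str.join " " ((x :: rest).take 3) :: pvChunks ((x :: rest).drop 3)
termination_by xs => xs.length
decreasing_by simp

def pvGlue (xs : List String) : String := PySem.Str.join "  " (pvChunks xs)

lemma pvChunks_ne_nil (x : String) (rest : List String) : pvChunks (x :: rest) ≠ [] := by
  rw [pvChunks]; simp

lemma pvJoinSep_cons (a : String) (l : List String) :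
    PySem.Str.join "  " (a :: l) = if l = [] then a else a ++ "  " ++ PySem.Str.join "  " l := by
  match l with
  | [] =>
    rw [if_pos rfl]
    apply String.toList_inj.mp
    simp [PySem.Str.toList_join, PySem.Chars.join_singleton]
  | b :: rest =>
    rw [if_neg (List.cons_ne_nil _ _)]
    apply String.toList_inj.mp
    simp [PySem.Str.toList_join, PySem.Chars.join_cons_cons]

lemma pvAlt_nil : pvGlue [] = "" := by
  simp [pvGlue, pvChunks, PySem.Str.join, PySem.Chars.join_nil]

lemma pvAlt_cons (x : String) (rest : List String) :
    pvGlue (x :: rest) =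
      (if (x :: rest).drop 3 = [] then PySem.Str.join " " ((x :: rest).take 3)
       else PySem.Str.join " " ((x :: rest).take 3) ++ "  " ++ pvGlue ((x :: rest).drop 3)) := by
  unfold pvGlue
  rw [pvChunks, pvJoinSep_cons]
  by_cases hd : (x :: rest).drop 3 = []
  · simp only [hd, pvChunks]
  · rcases hl : (x :: rest).drop 3 with _ | ⟨y, ys⟩
    · exact absurd hl hd
    · rw [if_neg (pvChunks_ne_nil y ys)]; simp

-- the loop of B equals the chunk list
lemma pvBGroups_eq (n : Nat) : ∀ (scores : List String) (i : Int) (parts : List String), 0 ≤ i →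
    scores.length ≤ i.toNat + n →
    pvBGroups scores i parts = parts ++ pvChunks (scores.drop i.toNat) := by
  induction n with
  | zero =>
    intro scores i parts hi hn
    rw [pvBGroups, dif_neg (by simp only [PySem.List.len_eq]; omega)]
    have : scores.drop i.toNat = [] := List.drop_eq_nil_of_le (by omega)
    simp [this, pvChunks]
  | succ n ih =>
    intro scores i parts hi hn
    by_cases hlt : i < PySem.List.len scores
    · rw [pvBGroups, dif_pos hlt]
      have hlen : i.toNat < scores.length := by simp only [PySem.List.len_eq] at hlt; omega
      have hslice : PySem.List.slice scores (some i) (some (i + 3)) = (scores.drop i.toNat).take 3 := by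
        rw [PySem.List.slice_toNat scores (by omega) (by omega)]
        congr 1; omega
      rw [ih scores (i + 3) _ (by omega) (by omega), hslice]
      rcases hd : scores.drop i.toNat with _ | ⟨y, ys⟩
      · have : ¬ i.toNat < scores.length := by
          have := List.length_drop (l := scores) (i := i.toNat); rw [hd] at this; simp at this; omega
        omega
      · have hdrop : scores.drop (i + 3).toNat = (scores.drop i.toNat).drop 3 := by
          rw [List.drop_drop]; congr 1; omega
        rw [hdrop, hd, pvChunks]
        simp
    · rw [pvBGroups, dif_neg hlt]
      have : scores.drop i.toNat = [] := by
        simp only [PySem.List.len_eq] at hlt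
        exact List.drop_eq_nil_of_le (by omega)
      simp [this, pvChunks]

lemma pvAlt_eq_glue (scores : List String) : format_score_py_alt scores = pvGlue scores := by
  unfold format_score_py_alt pvGlue
  rw [pvBGroups_eq scores.length scores 0 [] le_rfl (by simp)]
  simp

lemma pvJoin_one (a : String) : PySem.Str.join " " [a] = a := by
  apply String.toList_inj.mp
  simp [PySem.Str.toList_join, PySem.Chars.join_singleton]

lemma pvJoin_two (a b : String) : PySem.Str.join " " [a, b] = (a ++ " ") ++ b := by
  apply String.toList_inj.mp
  simp [PySem.Str.toList_join, PySem.Chars.join_cons_cons, PySem.Chars.join_singleton]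

lemma pvJoin_three (a b c : String) : PySem.Str.join " " [a, b, c] = (((a ++ " ") ++ b) ++ " ") ++ c := by
  apply String.toList_inj.mp
  simp [PySem.Str.toList_join, PySem.Chars.join_cons_cons, PySem.Chars.join_singleton]

lemma pvAlt_one (a : String) : pvGlue [a] = a := by
  rw [pvAlt_cons]; simp [pvJoin_one]

lemma pvAlt_two (a b : String) : pvGlue [a, b] = (a ++ " ") ++ b := by
  rw [pvAlt_cons]; simp [pvJoin_two]

lemma pvAlt_threeCons (a b c : String) (rest : List String) :
    pvGlue (a :: b :: c :: rest) =
      (if rest = [] then (((a ++ " ") ++ b) ++ " ") ++ c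
       else ((((a ++ " ") ++ b) ++ " ") ++ c) ++ "  " ++ pvGlue rest) := by
  rw [pvAlt_cons]; simp [pvJoin_three]

-- chunk-aligned loop invariant for A's fold: starting at an index k > 0 with k % 3 = 0
lemma pvFoldA_chunk (n : Nat) : ∀ (xs : List String), xs.length ≤ n → ∀ (k : Int) (acc : String),
    0 < k → k % 3 = 0 →
    (PySem.List.enumerate xs k).foldl pvStepA acc =
      if xs = [] then acc else (acc ++ "  ") ++ pvGlue xs := by
  induction n with
  | zero =>
    intro xs hx k acc _ _
    have : xs = [] := by cases xs <;> simp_all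
    simp [this, PySem.List.enumerate_nil]
  | succ n ih =>
    intro xs hx k acc hk h3
    match xs with
    | [] => simp [PySem.List.enumerate_nil]
    | [a] =>
      simp only [PySem.List.enumerate_cons, PySem.List.enumerate_nil, List.foldl_cons, List.foldl_nil]
      rw [pvStepA_sep2 _ _ _ (by omega) h3, pvAlt_one]
      simp
    | [a, b] =>
      simp only [PySem.List.enumerate_cons, List.foldl_cons, List.foldl_nil, PySem.List.enumerate_nil]
      rw [pvStepA_sep2 _ _ _ (by omega) h3, pvStepA_sep1 _ _ _ (by omega) (by omega), pvAlt_two]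
      apply String.toList_inj.mp; simp
    | a :: b :: c :: rest =>
      simp only [PySem.List.enumerate_cons, List.foldl_cons]
      rw [pvStepA_sep2 _ _ _ (by omega) h3, pvStepA_sep1 _ _ _ (by omega) (by omega),
          pvStepA_sep1 _ _ _ (by omega) (by omega)]
      have hlen : rest.length ≤ n := by simp at hx; omega
      have hrec := fun acc' => ih rest hlen (k + 1 + 1 + 1) acc' (by omega) (by omega)
      rw [hrec, pvAlt_threeCons]
      rw [if_neg (List.cons_ne_nil _ _)]
      by_cases hr : rest = []
      · simp only [hr]
        apply String.toList_inj.mp; simp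
      · simp only [if_neg hr]
        apply String.toList_inj.mp; simp

-- ===== VERDICT (by name: the statement is the Claim_ definition above) =====
theorem format_score_py_spec : Claim_equal_format_score_py := by
  intro scores _
  unfold Spec_format_score_py format_score_py
  rw [pvAlt_eq_glue]
  match scores with
  | [] => simp [PySem.List.enumerate_nil, pvAlt_nil]
  | [a] =>
    simp only [PySem.List.enumerate_cons, PySem.List.enumerate_nil, List.foldl_cons, List.foldl_nil]
    rw [pvStepA_zero, pvAlt_one]
    apply String.toList_inj.mp; simp
  | [a, b] =>
    simp only [PySem.List.enumerate_cons, List.foldl_cons, List.foldl_nil, PySem.List.enumerate_nil]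
    rw [pvStepA_zero, pvStepA_sep1 _ _ _ (by omega) (by omega), pvAlt_two]
    apply String.toList_inj.mp; simp
  | a :: b :: c :: rest =>
    simp only [PySem.List.enumerate_cons, List.foldl_cons]
    rw [pvStepA_zero, pvStepA_sep1 _ _ _ (by omega) (by omega),
        pvStepA_sep1 _ _ _ (by omega) (by omega)]
    have hrec := fun acc' => pvFoldA_chunk rest.length rest le_rfl (0 + 1 + 1 + 1) acc' (by omega) (by omega)
    rw [hrec, pvAlt_threeCons]
    by_cases hr : rest = []
    · simp only [hr]
      apply String.toList_inj.mp; simp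
    · simp only [if_neg hr]
      apply String.toList_inj.mp; simp
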